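-- pv_equiv track=rewrite | github.com/Baprik/KTH-ass4-snake-python | movement.py | prevent_collision_with_opponents
-- ===== SOURCE A (Python) =====
-- def is_a_move_safe(move, head, body_part):
--   if move == 'up' and body_part['y'] == head['y'] + 1 and body_part[
--           'x'] == head['x']:
--       return False
--   if move == 'down' and body_part['y'] == head['y'] - 1 and body_part[
--           'x'] == head['x']:
--       return False
--   if move == 'left' and body_part['x'] == head['x'] - 1 and body_part[
--           'y'] == head['y']:
--       return False
--   if move == 'right' and body_part['x'] == head['x'] + 1 and body_part[
--           'y'] == head['y']:
--       return False
--   return True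
--
-- def prevent_collision_with_opponents(opponents, my_body, is_move_safe):
--   my_head = my_body[0]
--   for opponent in opponents:
--       for body_part in opponent['body']:
--           for move, isSafe in is_move_safe.items():
--               if isSafe:
--                   is_move_safe[move] = is_a_move_safe(
--                       move, my_head, body_part)
--   return is_move_safe
-- ===== SOURCE B (Python) =====
-- def prevent_collision_with_opponents(opponents, my_body, is_move_safe):
--     # Build the set of occupied cells once, then test only the four cardinal
--     # neighbours of the head; mutates is_move_safe in place like the original.
--     occupied = {(bp.get('x', 0), bp.get('y', 0))
--                 for opp in opponents for bp in opp['body']}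
--     head = my_body[0]
--     hx, hy = head.get('x', 0), head.get('y', 0)
--     for move, (dx, dy) in (('up', (0, 1)), ('down', (0, -1)),
--                            ('left', (-1, 0)), ('right', (1, 0))):
--         if is_move_safe.get(move) and (hx + dx, hy + dy) in occupied:
--             is_move_safe[move] = False
--     return is_move_safe
-- ===== Notes on version B (the rewrite author's own statement) =====
-- stated objective: idiomatic
-- what changed: Instead of re-scanning the whole moves dict for every opponent body part, B builds a set of occupied cells in one pass and then checks only the four cardinal neighbours of the head, setting those moves to False.
import Mathlib
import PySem

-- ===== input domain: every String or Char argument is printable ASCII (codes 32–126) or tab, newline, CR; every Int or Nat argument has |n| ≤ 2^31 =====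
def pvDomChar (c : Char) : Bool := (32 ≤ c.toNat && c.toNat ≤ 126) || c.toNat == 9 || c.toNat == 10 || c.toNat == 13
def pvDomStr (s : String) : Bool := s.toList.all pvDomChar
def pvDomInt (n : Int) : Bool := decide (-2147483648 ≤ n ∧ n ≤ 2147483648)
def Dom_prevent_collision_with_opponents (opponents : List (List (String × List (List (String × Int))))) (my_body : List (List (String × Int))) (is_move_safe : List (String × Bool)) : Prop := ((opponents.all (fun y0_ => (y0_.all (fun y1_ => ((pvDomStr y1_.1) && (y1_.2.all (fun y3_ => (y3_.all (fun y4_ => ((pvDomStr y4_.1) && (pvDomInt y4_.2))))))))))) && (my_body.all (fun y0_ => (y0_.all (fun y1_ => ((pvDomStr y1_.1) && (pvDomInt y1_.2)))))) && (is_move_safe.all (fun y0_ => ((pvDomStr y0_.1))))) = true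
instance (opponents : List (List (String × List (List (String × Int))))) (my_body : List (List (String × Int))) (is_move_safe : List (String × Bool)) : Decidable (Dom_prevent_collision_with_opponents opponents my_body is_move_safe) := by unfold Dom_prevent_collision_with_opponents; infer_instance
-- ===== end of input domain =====

-- B builds the set of occupied cells once and checks only the four cardinal neighbours of
-- the head, instead of A's re-scan of the whole moves dict for every opponent body part.
-- Both Pythons mutate is_move_safe in place; the theorem is about the returned value.

-- shared helpers: Python's body_part['x'] / opponent['body'] (exact where the key is
-- present, which Pre_ guarantees; getD 0 / getD [] is a dummy outside that)
def pvGetInt (l : List (String × Int)) (k : String) : Int :=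
  ((PySem.Dict.mk l).get? k).getD 0

def pvBody (opp : List (String × List (List (String × Int)))) : List (List (String × Int)) :=
  ((PySem.Dict.mk opp).get? "body").getD []

-- the loop bodies of the two ports, named so the lemmas below can speak about them
def stepA (g : String → Bool) (d' : PySem.Dict String Bool) (ms : String × Bool) : PySem.Dict String Bool :=
  if ms.2 then d'.insert ms.1 (g ms.1) else d'

def stepB (c : String × Int × Int → Bool) (d : PySem.Dict String Bool) (m : String × Int × Int) : PySem.Dict String Bool :=
  if d.getD m.1 false && c m then d.insert m.1 false else d

-- ===== PORT A =====
def is_a_move_safe (move : String) (head : List (String × Int)) (body_part : List (String × Int)) : Bool :=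
  if move == "up" && (pvGetInt body_part "y" == pvGetInt head "y" + 1) && (pvGetInt body_part "x" == pvGetInt head "x") then false
  else if move == "down" && (pvGetInt body_part "y" == pvGetInt head "y" - 1) && (pvGetInt body_part "x" == pvGetInt head "x") then false
  else if move == "left" && (pvGetInt body_part "x" == pvGetInt head "x" - 1) && (pvGetInt body_part "y" == pvGetInt head "y") then false
  else if move == "right" && (pvGetInt body_part "x" == pvGetInt head "x" + 1) && (pvGetInt body_part "y" == pvGetInt head "y") then false
  else true

def prevent_collision_with_opponents (opponents : List (List (String × List (List (String × Int))))) (my_body : List (List (String × Int))) (is_move_safe : List (String × Bool)) : List (String × Bool) :=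
  let my_head := my_body.headD []
  (opponents.foldl (fun d opponent =>
    (pvBody opponent).foldl (fun d body_part =>
      d.items.foldl (stepA (fun move => is_a_move_safe move my_head body_part)) d) d)
    (PySem.Dict.mk is_move_safe)).items

-- ===== PORT B =====
def prevent_collision_with_opponents_alt (opponents : List (List (String × List (List (String × Int))))) (my_body : List (List (String × Int))) (is_move_safe : List (String × Bool)) : List (String × Bool) :=
  let occupied : PySem.Set (Int × Int) :=
    PySem.Set.ofList (opponents.flatMap (fun opp =>
      (pvBody opp).map (fun bp => (pvGetInt bp "x", pvGetInt bp "y"))))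
  let head := my_body.headD []
  let hx := pvGetInt head "x"
  let hy := pvGetInt head "y"
  ([("up", ((0 : Int), (1 : Int))), ("down", (0, -1)), ("left", (-1, 0)), ("right", (1, 0))].foldl
    (stepB (fun m => PySem.Set.contains occupied (hx + m.2.1, hy + m.2.2)))
    (PySem.Dict.mk is_move_safe)).items

-- ===== PRECONDITION & SPEC =====
-- Pre_ excludes inputs where Python A raises (empty my_body: IndexError; an opponent
-- without 'body': KeyError) and, when body parts exist AND some cardinal move is
-- initially True, inputs whose head/body-part dicts lack an 'x'/'y' key: whether A
-- raises there depends on coordinate values reached mid-scan, so this value-dependent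
-- crash region is excluded conservatively (A can still return on part of it — cited).
-- The Nodup conjunct only says the assoc list models a genuine Python dict.
def Pre_prevent_collision_with_opponents (opponents : List (List (String × List (List (String × Int))))) (my_body : List (List (String × Int))) (is_move_safe : List (String × Bool)) : Prop :=
  my_body ≠ [] ∧ (is_move_safe.map Prod.fst).Nodup ∧
  (∀ opp ∈ opponents, (PySem.Dict.mk opp).contains "body" = true) ∧
  (((PySem.Dict.mk (my_body.headD [])).contains "x" = true ∧
    (PySem.Dict.mk (my_body.headD [])).contains "y" = true ∧
    ∀ opp ∈ opponents, ∀ bp ∈ pvBody opp,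
      (PySem.Dict.mk bp).contains "x" = true ∧ (PySem.Dict.mk bp).contains "y" = true) ∨
   opponents.flatMap pvBody = [] ∨
   (∀ p ∈ is_move_safe, p.2 = true →
      p.1 ≠ "up" ∧ p.1 ≠ "down" ∧ p.1 ≠ "left" ∧ p.1 ≠ "right"))
instance (opponents : List (List (String × List (List (String × Int))))) (my_body : List (List (String × Int))) (is_move_safe : List (String × Bool)) : Decidable (Pre_prevent_collision_with_opponents opponents my_body is_move_safe) := by unfold Pre_prevent_collision_with_opponents; infer_instance

def pvWitness_prevent_collision_with_opponents : (List (List (String × List (List (String × Int))))) × (List (List (String × Int))) × (List (String × Bool)) :=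
  ([[("body", [[("x", 1), ("y", 0)]])]], [[("x", 0), ("y", 0)]], [("up", true), ("right", true)])

def Spec_prevent_collision_with_opponents (opponents : List (List (String × List (List (String × Int))))) (my_body : List (List (String × Int))) (is_move_safe : List (String × Bool)) (out : List (String × Bool)) : Prop := out = prevent_collision_with_opponents_alt opponents my_body is_move_safe
instance (opponents : List (List (String × List (List (String × Int))))) (my_body : List (List (String × Int))) (is_move_safe : List (String × Bool)) (out : List (String × Bool)) : Decidable (Spec_prevent_collision_with_opponents opponents my_body is_move_safe out) := by unfold Spec_prevent_collision_with_opponents; infer_instance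

-- ===== CLAIM (what is proved, stated in full; the proofs are below) =====
def Claim_equal_prevent_collision_with_opponents : Prop := ∀ (opponents : List (List (String × List (List (String × Int))))) (my_body : List (List (String × Int))) (is_move_safe : List (String × Bool)), Dom_prevent_collision_with_opponents opponents my_body is_move_safe → Pre_prevent_collision_with_opponents opponents my_body is_move_safe → Spec_prevent_collision_with_opponents opponents my_body is_move_safe (prevent_collision_with_opponents opponents my_body is_move_safe)

-- ===== LEMMAS AND PROOFS =====
-- A's inner pass over the items of d (one body part): pointwise effect on getD
lemma inner_getD (g : String → Bool) (l : List (String × Bool)) :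
    ∀ (d : PySem.Dict String Bool),
    (∀ p ∈ l, d.get? p.1 = some p.2) → (l.map Prod.fst).Nodup →
    ∀ k, ((l.foldl (stepA g) d).getD k false)
      = (if k ∈ l.map Prod.fst then d.getD k false && g k else d.getD k false) := by
  induction l with
  | nil => intro d _ _ k; simp
  | cons p t ih =>
    intro d hget hln k
    obtain ⟨k0, v⟩ := p
    simp only [List.map_cons, List.nodup_cons] at hln
    obtain ⟨hk0t, hlnt⟩ := hln
    have hv : d.get? k0 = some v := hget (k0, v) (List.mem_cons_self ..)
    have hget1 : ∀ q ∈ t, (stepA g d (k0, v)).get? q.1 = some q.2 := by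
      intro q hq
      have hne : q.1 ≠ k0 := fun h => hk0t (h ▸ List.mem_map_of_mem hq)
      cases v with
      | false => simpa [stepA] using hget q (List.mem_cons_of_mem _ hq)
      | true =>
        simp only [stepA, if_true]
        rw [PySem.Dict.get?_insert, if_neg hne]
        exact hget q (List.mem_cons_of_mem _ hq)
    simp only [List.foldl_cons]
    rw [ih _ hget1 hlnt k]
    have hdk0 : d.getD k0 false = v := by
      rw [PySem.Dict.getD_eq_get?_getD, hv]; rfl
    by_cases hk : k ∈ t.map Prod.fst
    · have hkne : k ≠ k0 := fun h => hk0t (h ▸ hk)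
      have hgd : (stepA g d (k0, v)).getD k false = d.getD k false := by
        cases v with
        | false => simp [stepA]
        | true => simp [stepA, PySem.Dict.getD_insert, hkne]
      simp [hk, hgd, List.mem_cons]
    · by_cases hk0 : k = k0
      · subst hk0
        cases v with
        | false => simp [stepA, hk, hdk0]
        | true => simp [stepA, hk, hdk0]
      · have hgd : (stepA g d (k0, v)).getD k false = d.getD k false := by
          cases v with
          | false => simp [stepA]
          | true => simp [stepA, PySem.Dict.getD_insert, hk0]
        simp [hk, hk0, hgd, List.mem_cons]

lemma inner_keys (g : String → Bool) (l : List (String × Bool)) :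
    ∀ (d : PySem.Dict String Bool),
    (∀ p ∈ l, d.get? p.1 = some p.2) → (l.map Prod.fst).Nodup →
    (l.foldl (stepA g) d).keys = d.keys := by
  induction l with
  | nil => intro d _ _; rfl
  | cons p t ih =>
    intro d hget hln
    obtain ⟨k0, v⟩ := p
    simp only [List.map_cons, List.nodup_cons] at hln
    obtain ⟨hk0t, hlnt⟩ := hln
    have hv : d.get? k0 = some v := hget (k0, v) (List.mem_cons_self ..)
    have hget1 : ∀ q ∈ t, (stepA g d (k0, v)).get? q.1 = some q.2 := by
      intro q hq
      have hne : q.1 ≠ k0 := fun h => hk0t (h ▸ List.mem_map_of_mem hq)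
      cases v with
      | false => simpa [stepA] using hget q (List.mem_cons_of_mem _ hq)
      | true =>
        simp only [stepA, if_true]
        rw [PySem.Dict.get?_insert, if_neg hne]
        exact hget q (List.mem_cons_of_mem _ hq)
    simp only [List.foldl_cons]
    rw [ih _ hget1 hlnt]
    cases v with
    | false => simp [stepA]
    | true =>
      have hc : d.contains k0 = true := by
        rw [PySem.Dict.contains_eq_isSome_get?, hv]; rfl
      simp [stepA, PySem.Dict.keys_insert_of_contains _ _ hc]

-- one whole body-part pass (the fold over d.items), as a pointwise map on getD
lemma pass_getD (g : String → Bool) (d : PySem.Dict String Bool) (hnd : d.keys.Nodup) :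
    ∀ k, ((d.items.foldl (stepA g) d).getD k false) = (d.getD k false && g k) := by
  intro k
  have hget : ∀ p ∈ d.items, d.get? p.1 = some p.2 := by
    intro p hp
    exact PySem.Dict.get?_of_mem_items _ hp hnd
  have hmap : d.items.map Prod.fst = d.keys := rfl
  rw [inner_getD g d.items d hget (hmap ▸ hnd) k]
  by_cases hk : k ∈ d.items.map Prod.fst
  · rw [if_pos hk]
  · have hc : d.contains k = false := by
      rw [hmap] at hk
      by_contra h
      exact hk ((PySem.Dict.contains_iff_mem_keys d k).mp (by revert h; cases d.contains k <;> simp))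
    rw [if_neg hk, PySem.Dict.getD_of_not_contains _ _ hc]
    simp

lemma pass_keys (g : String → Bool) (d : PySem.Dict String Bool) (hnd : d.keys.Nodup) :
    (d.items.foldl (stepA g) d).keys = d.keys := by
  have hget : ∀ p ∈ d.items, d.get? p.1 = some p.2 := by
    intro p hp
    exact PySem.Dict.get?_of_mem_items _ hp hnd
  exact inner_keys g d.items d hget hnd

-- A's outer double loop, flattened over the concatenated list of body parts
lemma outer_getD (head : List (String × Int)) (bps : List (List (String × Int))) :
    ∀ (d : PySem.Dict String Bool), d.keys.Nodup →
    ((bps.foldl (fun d bp => d.items.foldl (stepA (fun m => is_a_move_safe m head bp)) d) d).getD · false)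
      = (fun k => d.getD k false && bps.all (fun bp => is_a_move_safe k head bp)) := by
  induction bps with
  | nil => intro d _; funext k; simp
  | cons bp t ih =>
    intro d hnd
    funext k
    simp only [List.foldl_cons]
    have hnd1 : (d.items.foldl (stepA (fun m => is_a_move_safe m head bp)) d).keys.Nodup := by
      rw [pass_keys _ d hnd]; exact hnd
    rw [congrFun (ih _ hnd1) k, pass_getD _ d hnd k]
    simp [Bool.and_assoc]

lemma outer_keys (head : List (String × Int)) (bps : List (List (String × Int))) :
    ∀ (d : PySem.Dict String Bool), d.keys.Nodup →
    (bps.foldl (fun d bp => d.items.foldl (stepA (fun m => is_a_move_safe m head bp)) d) d).keys = d.keys := by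
  induction bps with
  | nil => intro d _; rfl
  | cons bp t ih =>
    intro d hnd
    simp only [List.foldl_cons]
    rw [ih _ (by rw [pass_keys _ d hnd]; exact hnd), pass_keys _ d hnd]

-- nested fold over opponents = fold over the flattened body-part list
lemma fold_flat (f : PySem.Dict String Bool → List (String × Int) → PySem.Dict String Bool)
    (opponents : List (List (String × List (List (String × Int))))) :
    ∀ (d : PySem.Dict String Bool),
    opponents.foldl (fun d opp => (pvBody opp).foldl f d) d
      = (opponents.flatMap pvBody).foldl f d := by
  induction opponents with
  | nil => intro d; rfl
  | cons opp t ih => intro d; simp [List.foldl_cons, List.flatMap_cons, List.foldl_append, ih]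

-- B's fold over the four cardinal moves: pointwise effect on getD
lemma bfold_getD (c : String × Int × Int → Bool) (l : List (String × Int × Int)) :
    ∀ (d : PySem.Dict String Bool), ∀ k,
    ((l.foldl (stepB c) d).getD k false)
      = (d.getD k false && l.all (fun m => !(m.1 == k && c m))) := by
  induction l with
  | nil => intro d k; simp
  | cons m t ih =>
    intro d k
    simp only [List.foldl_cons, List.all_cons]
    rw [ih _ k]
    have hgd : (stepB c d m).getD k false
        = (d.getD k false && !(m.1 == k && c m)) := by
      by_cases hk : k = m.1
      · subst hk
        cases hdg : d.getD m.1 false <;> cases hcm : c m <;>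
          simp [stepB, hdg, hcm]
      · have hkne : (m.1 == k) = false := beq_eq_false_iff_ne.mpr (Ne.symm hk)
        cases hfire : (d.getD m.1 false && c m) <;>
          simp [stepB, hfire, PySem.Dict.getD_insert, hk, hkne]
    rw [hgd]
    cases d.getD k false <;> cases (m.1 == k && c m) <;> simp

lemma bfold_keys (c : String × Int × Int → Bool) (l : List (String × Int × Int)) :
    ∀ (d : PySem.Dict String Bool),
    (l.foldl (stepB c) d).keys = d.keys := by
  induction l with
  | nil => intro d; rfl
  | cons m t ih =>
    intro d
    simp only [List.foldl_cons]
    rw [ih]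
    by_cases hfire : (d.getD m.1 false && c m) = true
    · have hc : d.contains m.1 = true := by
        by_contra h
        have hc' : d.contains m.1 = false := by revert h; cases d.contains m.1 <;> simp
        rw [PySem.Dict.getD_of_not_contains _ _ hc'] at hfire
        simp at hfire
      simp [stepB, hfire, PySem.Dict.keys_insert_of_contains _ _ hc]
    · simp [stepB, hfire]

-- the four branch tests of is_a_move_safe, per cardinal move
lemma safe_up (h bp : List (String × Int)) :
    is_a_move_safe "up" h bp
      = !((pvGetInt bp "y" == pvGetInt h "y" + 1) && (pvGetInt bp "x" == pvGetInt h "x")) := by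
  simp only [is_a_move_safe]
  cases hy : (pvGetInt bp "y" == pvGetInt h "y" + 1) <;>
    cases hx : (pvGetInt bp "x" == pvGetInt h "x") <;> simp

lemma safe_down (h bp : List (String × Int)) :
    is_a_move_safe "down" h bp
      = !((pvGetInt bp "y" == pvGetInt h "y" - 1) && (pvGetInt bp "x" == pvGetInt h "x")) := by
  simp only [is_a_move_safe]
  cases hy : (pvGetInt bp "y" == pvGetInt h "y" - 1) <;>
    cases hx : (pvGetInt bp "x" == pvGetInt h "x") <;> simp

lemma safe_left (h bp : List (String × Int)) :
    is_a_move_safe "left" h bp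
      = !((pvGetInt bp "x" == pvGetInt h "x" - 1) && (pvGetInt bp "y" == pvGetInt h "y")) := by
  simp only [is_a_move_safe]
  cases hx : (pvGetInt bp "x" == pvGetInt h "x" - 1) <;>
    cases hy : (pvGetInt bp "y" == pvGetInt h "y") <;> simp

lemma safe_right (h bp : List (String × Int)) :
    is_a_move_safe "right" h bp
      = !((pvGetInt bp "x" == pvGetInt h "x" + 1) && (pvGetInt bp "y" == pvGetInt h "y")) := by
  simp only [is_a_move_safe]
  cases hx : (pvGetInt bp "x" == pvGetInt h "x" + 1) <;>
    cases hy : (pvGetInt bp "y" == pvGetInt h "y") <;> simp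

lemma safe_other (k : String) (h bp : List (String × Int))
    (h1 : k ≠ "up") (h2 : k ≠ "down") (h3 : k ≠ "left") (h4 : k ≠ "right") :
    is_a_move_safe k h bp = true := by
  simp [is_a_move_safe, h1, h2, h3, h4]

-- the two "all body parts are safe" computations coincide, for every key
lemma alls_eq (head : List (String × Int)) (bps : List (List (String × Int))) (k : String) :
    bps.all (fun bp => is_a_move_safe k head bp)
      = ([("up", ((0 : Int), (1 : Int))), ("down", (0, -1)), ("left", (-1, 0)), ("right", (1, 0))].all
          (fun m => !(m.1 == k &&
            PySem.Set.contains
              (PySem.Set.ofList (bps.map (fun bp => (pvGetInt bp "x", pvGetInt bp "y"))))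
              (pvGetInt head "x" + m.2.1, pvGetInt head "y" + m.2.2)))) := by
  have hC : ∀ tx ty : Int,
      PySem.Set.contains
          (PySem.Set.ofList (bps.map (fun bp => (pvGetInt bp "x", pvGetInt bp "y")))) (tx, ty)
        = bps.any (fun bp => (pvGetInt bp "x" == tx) && (pvGetInt bp "y" == ty)) := by
    intro tx ty
    rw [Bool.eq_iff_iff]
    simp [PySem.Set.mem_ofList, List.any_eq_true, Prod.mk.injEq]
  by_cases h1 : k = "up"
  · subst h1
    simp only [List.all_cons, List.all_nil, hC, safe_up]
    have e1 : (("up" : String) == "up") = true := by decide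
    have e2 : (("down" : String) == "up") = false := by decide
    have e3 : (("left" : String) == "up") = false := by decide
    have e4 : (("right" : String) == "up") = false := by decide
    simp only [e1, e2, e3, e4, Bool.true_and, Bool.false_and, Bool.not_false, Bool.and_true]
    rw [← List.not_any_eq_all_not]
    congr 1
    apply List.any_congr rfl
    intro bp
    simp only [add_zero]
    exact Bool.and_comm ..
  by_cases h2 : k = "down"
  · subst h2
    simp only [List.all_cons, List.all_nil, hC, safe_down]
    have e1 : (("up" : String) == "down") = false := by decide
    have e2 : (("down" : String) == "down") = true := by decide
    have e3 : (("left" : String) == "down") = false := by decide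
    have e4 : (("right" : String) == "down") = false := by decide
    simp only [e1, e2, e3, e4, Bool.true_and, Bool.false_and, Bool.not_false, Bool.and_true,
      Bool.true_and]
    rw [← List.not_any_eq_all_not]
    congr 1
    apply List.any_congr rfl
    intro bp
    simp only [add_zero, sub_eq_add_neg]
    exact Bool.and_comm ..
  by_cases h3 : k = "left"
  · subst h3
    simp only [List.all_cons, List.all_nil, hC, safe_left]
    have e1 : (("up" : String) == "left") = false := by decide
    have e2 : (("down" : String) == "left") = false := by decide
    have e3 : (("left" : String) == "left") = true := by decide
    have e4 : (("right" : String) == "left") = false := by decide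
    simp only [e1, e2, e3, e4, Bool.true_and, Bool.false_and, Bool.not_false, Bool.and_true]
    rw [← List.not_any_eq_all_not]
    congr 1
    apply List.any_congr rfl
    intro bp
    simp only [add_zero, sub_eq_add_neg]
  by_cases h4 : k = "right"
  · subst h4
    simp only [List.all_cons, List.all_nil, hC, safe_right]
    have e1 : (("up" : String) == "right") = false := by decide
    have e2 : (("down" : String) == "right") = false := by decide
    have e3 : (("left" : String) == "right") = false := by decide
    have e4 : (("right" : String) == "right") = true := by decide
    simp only [e1, e2, e3, e4, Bool.true_and, Bool.false_and, Bool.not_false, Bool.and_true]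
    rw [← List.not_any_eq_all_not]
    congr 1
    apply List.any_congr rfl
    intro bp
    simp only [add_zero]
  · have e1 : (("up" : String) == k) = false := beq_eq_false_iff_ne.mpr (Ne.symm h1)
    have e2 : (("down" : String) == k) = false := beq_eq_false_iff_ne.mpr (Ne.symm h2)
    have e3 : (("left" : String) == k) = false := beq_eq_false_iff_ne.mpr (Ne.symm h3)
    have e4 : (("right" : String) == k) = false := beq_eq_false_iff_ne.mpr (Ne.symm h4)
    simp [List.all_eq_true, e1, e2, e3, e4, safe_other k head _ h1 h2 h3 h4]

-- ===== VERDICT (by name: the statement is the Claim_ definition above) =====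
theorem prevent_collision_with_opponents_spec : Claim_equal_prevent_collision_with_opponents := by
  intro opponents my_body is_move_safe _ hpre
  obtain ⟨-, hnd, -, -⟩ := hpre
  unfold Spec_prevent_collision_with_opponents
  unfold prevent_collision_with_opponents prevent_collision_with_opponents_alt
  dsimp only
  have hnd0 : (PySem.Dict.mk is_move_safe).keys.Nodup := hnd
  rw [fold_flat]
  have hKA := outer_keys (my_body.headD []) (opponents.flatMap pvBody) (PySem.Dict.mk is_move_safe) hnd0
  have hKB := bfold_keys
    (fun m => PySem.Set.contains
      (PySem.Set.ofList (opponents.flatMap (fun opp =>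
        (pvBody opp).map (fun bp => (pvGetInt bp "x", pvGetInt bp "y")))))
      (pvGetInt (my_body.headD []) "x" + m.2.1, pvGetInt (my_body.headD []) "y" + m.2.2))
    [("up", ((0 : Int), (1 : Int))), ("down", (0, -1)), ("left", (-1, 0)), ("right", (1, 0))]
    (PySem.Dict.mk is_move_safe)
  rw [PySem.Dict.items_eq_map_keys _ (by rw [hKA]; exact hnd0) false,
      PySem.Dict.items_eq_map_keys _ (by rw [hKB]; exact hnd0) false, hKA, hKB]
  apply List.map_congr_left
  intro k _
  rw [congrFun (outer_getD (my_body.headD []) (opponents.flatMap pvBody) (PySem.Dict.mk is_move_safe) hnd0) k,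
      bfold_getD _ _ _ k,
      alls_eq (my_body.headD []) (opponents.flatMap pvBody) k,
      List.map_flatMap]
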